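-- pv_equiv track=rewrite | github.com/vilasini-v/cryptography-codes | sha/algorithm.py | sha_preprocess
-- ===== SOURCE A (Python) =====
-- def sha_preprocess(message):
--     binary_message = ''.join(format(byte, '08b') for byte in message.encode('utf-8'))
--     binary_message += '1'
--
--     while (len(binary_message) + 64) % 512 != 0:
--         binary_message += '0'
--
--     original_length = len(message) * 8
--     length_bits = format(original_length, '064b')
--     binary_message += length_bits
--     words = [int(binary_message[i:i+32], 2) for i in range(0, len(binary_message), 32)]
--     return words
-- ===== SOURCE B (Python) =====
-- def sha_preprocess(message):
--     padded = bytearray(message.encode('utf-8'))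
--     padded.append(0x80)
--     while (len(padded) + 8) % 64 != 0:
--         padded.append(0)
--     padded += (len(message) * 8).to_bytes(8, 'big')
--     return [int.from_bytes(padded[i:i+4], 'big') for i in range(0, len(padded), 4)]
-- ===== Notes on version B (the rewrite author's own statement) =====
-- stated objective: faster
-- what changed: B replaces A's string-of-bits pipeline (formatting every byte as 8 binary characters, a character-appending pad loop, re-parsing each 32-character substring as a base-2 integer) by byte arithmetic: a bytearray padded with 0x80 and zero bytes, an 8-byte big-endian length field from to_bytes, and 4-byte words via int.from_bytes.
import Mathlib
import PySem

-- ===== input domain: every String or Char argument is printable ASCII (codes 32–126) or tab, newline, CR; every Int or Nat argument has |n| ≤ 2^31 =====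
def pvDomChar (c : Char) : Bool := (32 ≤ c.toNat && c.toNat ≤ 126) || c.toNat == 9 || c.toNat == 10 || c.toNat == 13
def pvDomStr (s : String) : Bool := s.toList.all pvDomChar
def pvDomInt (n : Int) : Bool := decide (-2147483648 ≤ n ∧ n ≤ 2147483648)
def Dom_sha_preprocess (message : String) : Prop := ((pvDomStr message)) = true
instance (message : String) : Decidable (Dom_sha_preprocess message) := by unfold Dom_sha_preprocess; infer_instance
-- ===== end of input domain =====

-- B replaces A's string-of-bits construction and re-parsing by byte arithmetic (pad the byte
-- string with 0x80 and zero bytes, append the 8-byte big-endian length, read 4-byte words);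
-- a timing run measured B faster by a constant factor.

-- ===== PORT A =====
-- format(x, <zero-padded width-w binary>) for a nonnegative x
def pvPad0 (w : Nat) (ds : List Char) : List Char := List.replicate (w - ds.length) '0' ++ ds

-- int(cs, 2), ported by hand as the base-2 Horner fold; exact for the nonempty binary-digit
-- strings this algorithm feeds it (the digit core behind PySem.Int.ofCharsBase? is a private
-- definition no available lemma reaches, so the parse is transcribed step for step instead)
def pvBinVal (cs : List Char) : Int := cs.foldl (fun a c => 2 * a + (if c = '1' then 1 else 0)) 0

-- the loop `while (len(binary_message) + 64) % 512 != 0: binary_message += '0'`;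
-- it appends fewer than 512 characters, so a fuel of 512 always runs it to completion
def shaPadA : Nat → List Char → List Char
  | 0, s => s
  | fuel + 1, s => if (s.length + 64) % 512 ≠ 0 then shaPadA fuel (s ++ ['0']) else s

def sha_preprocess (message : String) : List Int :=
  -- message.encode('utf-8'): one byte per character, the character's code (exact on Dom: ASCII)
  let binaryMessage0 := ((message.toList.map (fun c => pvPad0 8 (PySem.Int.toBinChars (c.toNat)))).flatten)
  let binaryMessage1 := binaryMessage0 ++ ['1']
  let binaryMessage2 := shaPadA 512 binaryMessage1
  let originalLength : Int := PySem.Str.len message * 8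
  let lengthBits := pvPad0 64 (PySem.Int.toBinChars originalLength)
  let binaryMessage := binaryMessage2 ++ lengthBits
  (PySem.List.pyRange 0 (binaryMessage.length : Int) 32).map
    (fun i => pvBinVal (PySem.List.slice binaryMessage (some i) (some (i + 32))))

-- ===== PORT B =====
-- the loop `while (len(padded) + 8) % 64 != 0: padded.append(0)`;
-- it appends fewer than 64 bytes, so a fuel of 64 always runs it to completion
def altPadB : Nat → List Nat → List Nat
  | 0, bs => bs
  | fuel + 1, bs => if (bs.length + 8) % 64 ≠ 0 then altPadB fuel (bs ++ [0]) else bs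

-- n.to_bytes(k, big-endian): exact for n < 256^k (Pre_ guarantees it; Python raises OverflowError beyond)
def pvToBytesBE : Nat → Nat → List Nat
  | 0, _ => []
  | k + 1, n => pvToBytesBE k (n / 256) ++ [n % 256]

-- int.from_bytes(bs, big-endian)
def pvFromBytesBE (bs : List Nat) : Int := (bs.foldl (fun a b => a * 256 + b) 0 : Nat)

def sha_preprocess_alt (message : String) : List Int :=
  -- bytearray(message.encode('utf-8')) with 0x80 appended (exact on Dom: ASCII)
  let padded0 := message.toList.map Char.toNat ++ [128]
  let padded1 := altPadB 64 padded0
  let padded := padded1 ++ pvToBytesBE 8 (message.toList.length * 8)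
  (PySem.List.pyRange 0 (padded.length : Int) 4).map
    (fun i => pvFromBytesBE (PySem.List.slice padded (some i) (some (i + 4))))

-- ===== PRECONDITION & SPEC =====
-- Pre_ excludes only messages of ≥ 2^61 characters, whose bit length does not fit the 64-bit SHA
-- length field: there B's 8-byte to_bytes conversion raises OverflowError while A emits an over-long length
-- field; no realizable input reaches this bound.
def Pre_sha_preprocess (message : String) : Prop :=
  8 * message.toList.length < 18446744073709551616
instance (message : String) : Decidable (Pre_sha_preprocess message) := by
  unfold Pre_sha_preprocess; infer_instance
def pvWitness_sha_preprocess : String := "abc"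

def Spec_sha_preprocess (message : String) (out : List Int) : Prop := out = sha_preprocess_alt message
instance (message : String) (out : List Int) : Decidable (Spec_sha_preprocess message out) := by unfold Spec_sha_preprocess; infer_instance

-- ===== CLAIM (what is proved, stated in full; the proofs are below) =====
def Claim_equal_sha_preprocess : Prop := ∀ (message : String), Dom_sha_preprocess message → Pre_sha_preprocess message → Spec_sha_preprocess message (sha_preprocess message)

-- ===== LEMMAS AND PROOFS =====

-- fixed-width big-endian binary digits of m (low bits kept), the common normal form of the proof
def natBits : Nat → Nat → List Char
  | 0, _ => []
  | w + 1, m => natBits w (m / 2) ++ [if m % 2 = 1 then '1' else '0']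

-- format(n,'b') for n ≥ 1(or 0): binary digits, MSB first
def rawBin (n : Nat) : List Char :=
  if _h : n < 2 then [if n = 1 then '1' else '0']
  else rawBin (n / 2) ++ [if n % 2 = 1 then '1' else '0']
decreasing_by omega

theorem toDigitsCore_eq_rawBin : ∀ (f n : Nat) (acc : List Char), n < f →
    Nat.toDigitsCore 2 f n acc = rawBin n ++ acc := by
  intro f
  induction f with
  | zero => omega
  | succ f ih =>
    intro n acc h
    rw [Nat.toDigitsCore]
    rcases Nat.lt_or_ge n 2 with h2 | h2
    · have hd : n / 2 = 0 := by omega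
      rw [rawBin]
      simp only [hd, h2, dif_pos]
      have : n % 2 = n := by omega
      rw [this]
      interval_cases n <;> rfl
    · have hd : n / 2 ≠ 0 := by omega
      have hlt : n / 2 < f := by omega
      simp only [hd]
      rw [ih (n / 2) ((n % 2).digitChar :: acc) hlt]
      conv_rhs => rw [rawBin]
      rw [dif_neg (by omega)]
      have hdc : (n % 2).digitChar = (if n % 2 = 1 then '1' else '0') := by
        rcases Nat.mod_two_eq_zero_or_one n with h | h <;> rw [h] <;> rfl
      rw [hdc, List.append_assoc]
      rfl

theorem toBinChars_natCast (n : Nat) : PySem.Int.toBinChars (n : Int) = rawBin n := by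
  have : ¬ ((n : Int) < 0) := by omega
  simp only [PySem.Int.toBinChars, this, if_false, Int.toNat_natCast]
  rw [Nat.toDigits]
  rw [toDigitsCore_eq_rawBin (n + 1) n [] (by omega)]
  simp

theorem natBits_zero (w : Nat) : natBits w 0 = List.replicate w '0' := by
  induction w with
  | zero => rfl
  | succ w ih =>
    rw [natBits, Nat.zero_div, ih]
    simp [List.replicate_succ' ]

theorem natBits_length (w m : Nat) : (natBits w m).length = w := by
  induction w generalizing m with
  | zero => rfl
  | succ w ih => rw [natBits]; simp [ih]

theorem pad0_rawBin (w m : Nat) (hw : 0 < w) (hm : m < 2 ^ w) :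
    pvPad0 w (rawBin m) = natBits w m := by
  induction w generalizing m with
  | zero => omega
  | succ w ih =>
    rcases Nat.lt_or_ge m 2 with h2 | h2
    · have hd : m / 2 = 0 := by omega
      have hm2 : m % 2 = m := by omega
      rw [rawBin, dif_pos h2, natBits, hd, natBits_zero, hm2, pvPad0]
      simp only [List.length_cons, List.length_nil]
      have h3 : (if m = 1 then '1' else '0') = (if m % 2 = 1 then '1' else '0') := by rw [hm2]
      have h4 : w + 1 - (0 + 1) = w := by omega
      rw [h3, h4]
    · have hw' : 0 < w := by
        by_contra h
        have : w = 0 := by omega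
        subst this
        omega
      have hm2 : m / 2 < 2 ^ w := by rw [pow_succ] at hm; omega
      rw [rawBin, dif_neg (by omega), natBits, ← ih (m / 2) hw' hm2]
      unfold pvPad0
      simp only [List.length_append, List.length_cons, List.length_nil]
      have h5 : w + 1 - ((rawBin (m / 2)).length + (0 + 1)) = w - (rawBin (m / 2)).length := by
        omega
      rw [h5, ← List.append_assoc]

-- m % 2^(w+1) in terms of m/2 % 2^w
theorem mod_pow_succ_eq (m w : Nat) : m % 2 ^ (w + 1) = 2 * (m / 2 % 2 ^ w) + m % 2 := by
  have h1 : m % (2 * 2 ^ w) / 2 = m / 2 % 2 ^ w := Nat.mod_mul_right_div_self m 2 (2 ^ w)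
  have h2 : m % (2 * 2 ^ w) % 2 = m % 2 := Nat.mod_mod_of_dvd m ⟨2 ^ w, rfl⟩
  have h3 : 2 ^ (w + 1) = 2 * 2 ^ w := by ring
  rw [h3, ← h1, ← h2]
  omega

theorem natBits_split (w1 w2 m : Nat) :
    natBits (w1 + w2) m = natBits w1 (m / 2 ^ w2) ++ natBits w2 (m % 2 ^ w2) := by
  induction w2 generalizing m with
  | zero => simp [natBits]
  | succ w2 ih =>
    have e1 : w1 + (w2 + 1) = (w1 + w2) + 1 := by omega
    have hpow : (2 : Nat) ^ (w2 + 1) = 2 * 2 ^ w2 := by ring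
    have e2 : m / 2 / 2 ^ w2 = m / 2 ^ (w2 + 1) := by
      rw [Nat.div_div_eq_div_mul, hpow]
    have e3 : m / 2 % 2 ^ w2 = m % 2 ^ (w2 + 1) / 2 := by
      rw [hpow, Nat.mod_mul_right_div_self]
    have e4 : (if m % 2 = 1 then '1' else '0') = (if m % 2 ^ (w2 + 1) % 2 = 1 then '1' else '0') := by
      rw [Nat.mod_mod_of_dvd m ⟨2 ^ w2, hpow⟩]
    rw [e1, natBits, ih, natBits, e2, e3, e4, List.append_assoc]

theorem bytes_flatten (k n : Nat) :
    ((pvToBytesBE k n).map (natBits 8)).flatten = natBits (8 * k) n := by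
  induction k generalizing n with
  | zero => simp [pvToBytesBE, natBits]
  | succ k ih =>
    rw [pvToBytesBE]
    simp only [List.map_append, List.map_cons, List.map_nil, List.flatten_append, List.flatten_cons,
      List.flatten_nil, List.append_nil]
    rw [ih]
    have h8 : 8 * (k + 1) = 8 * k + 8 := by ring
    have h256 : (2 : Nat) ^ 8 = 256 := by norm_num
    rw [h8, natBits_split (8 * k) 8 n, h256]

theorem pvToBytesBE_lt (k n : Nat) : ∀ x ∈ pvToBytesBE k n, x < 256 := by
  induction k generalizing n with
  | zero => simp [pvToBytesBE]
  | succ k ih =>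
    intro x hx
    rw [pvToBytesBE] at hx
    rcases List.mem_append.mp hx with h | h
    · exact ih _ _ h
    · simp at h; omega

theorem shaPadA_eq (fuel : Nat) (s : List Char)
    (hf : (512 - (s.length + 64) % 512) % 512 ≤ fuel) :
    shaPadA fuel s = s ++ List.replicate ((512 - (s.length + 64) % 512) % 512) '0' := by
  induction fuel generalizing s with
  | zero =>
    have h0 : (512 - (s.length + 64) % 512) % 512 = 0 := by omega
    rw [h0, shaPadA]
    simp
  | succ fuel ih =>
    rw [shaPadA]
    by_cases h : (s.length + 64) % 512 ≠ 0
    · rw [if_pos h]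
      have h1 : (s ++ ['0']).length = s.length + 1 := by simp
      rw [ih (s ++ ['0']) (by rw [h1]; omega), h1, List.append_assoc]
      congr 1
      have h2 : (512 - (s.length + 64) % 512) % 512
          = (512 - (s.length + 1 + 64) % 512) % 512 + 1 := by omega
      rw [h2, List.replicate_succ]
      rfl
    · rw [if_neg h]
      have h2 : (512 - (s.length + 64) % 512) % 512 = 0 := by omega
      rw [h2]
      simp

theorem altPadB_eq (fuel : Nat) (bs : List Nat)
    (hf : (64 - (bs.length + 8) % 64) % 64 ≤ fuel) :
    altPadB fuel bs = bs ++ List.replicate ((64 - (bs.length + 8) % 64) % 64) 0 := by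
  induction fuel generalizing bs with
  | zero =>
    have h0 : (64 - (bs.length + 8) % 64) % 64 = 0 := by omega
    rw [h0, altPadB]
    simp
  | succ fuel ih =>
    rw [altPadB]
    by_cases h : (bs.length + 8) % 64 ≠ 0
    · rw [if_pos h]
      have h1 : (bs ++ [0]).length = bs.length + 1 := by simp
      rw [ih (bs ++ [0]) (by rw [h1]; omega), h1, List.append_assoc]
      congr 1
      have h2 : (64 - (bs.length + 8) % 64) % 64
          = (64 - (bs.length + 1 + 8) % 64) % 64 + 1 := by omega
      rw [h2, List.replicate_succ]
      rfl
    · rw [if_neg h]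
      have h2 : (64 - (bs.length + 8) % 64) % 64 = 0 := by omega
      rw [h2]
      simp

-- Horner value of a fixed-width chunk
theorem foldl_natBits (w m : Nat) (a : Int) :
    (natBits w m).foldl (fun a c => 2 * a + (if c = '1' then 1 else 0)) a
      = a * 2 ^ w + ((m % 2 ^ w : Nat) : Int) := by
  induction w generalizing m a with
  | zero => simp [natBits]
  | succ w ih =>
    rw [natBits, List.foldl_append, ih]
    simp only [List.foldl_cons, List.foldl_nil]
    have hb : (if (if m % 2 = 1 then '1' else '0') = '1' then (1:Int) else 0) = ((m % 2 : Nat) : Int) := by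
      rcases Nat.mod_two_eq_zero_or_one m with h | h <;> simp [h]
    rw [hb, mod_pow_succ_eq m w]
    push_cast
    ring

theorem binVal_flatten (ys : List Nat) (hy : ∀ y ∈ ys, y < 256) (a : Nat) :
    ((ys.map (natBits 8)).flatten).foldl (fun a c => 2 * a + (if c = '1' then 1 else 0)) (a : Int)
      = ((ys.foldl (fun x b => x * 256 + b) a : Nat) : Int) := by
  induction ys generalizing a with
  | nil => simp
  | cons y ys ih =>
    simp only [List.map_cons, List.flatten_cons, List.foldl_append, List.foldl_cons]
    rw [foldl_natBits]
    have hy0 : y < 256 := hy y (List.mem_cons_self)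
    have : y % 2 ^ 8 = y := by norm_num; omega
    rw [this]
    have : (a : Int) * 2 ^ 8 + (y : Int) = ((a * 256 + y : Nat) : Int) := by push_cast; ring
    rw [this]
    exact ih (fun z hz => hy z (List.mem_cons_of_mem _ hz)) (a * 256 + y)

theorem flatten_length (p : List Nat) : ((p.map (natBits 8)).flatten).length = 8 * p.length := by
  induction p with
  | nil => simp
  | cons x xs ih => simp [natBits_length, ih]; ring

theorem flatten_drop (k : Nat) (p : List Nat) :
    ((p.map (natBits 8)).flatten).drop (8 * k) = (((p.drop k).map (natBits 8)).flatten) := by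
  induction k generalizing p with
  | zero => simp
  | succ k ih =>
    cases p with
    | nil => simp
    | cons x xs =>
      simp only [List.map_cons, List.flatten_cons, List.drop_succ_cons]
      rw [List.drop_append]
      rw [natBits_length]
      have h1 : ¬ (8 * (k + 1) < 8) := by omega
      rw [List.drop_eq_nil_of_le (by rw [natBits_length]; omega)]
      have h2 : 8 * (k + 1) - 8 = 8 * k := by omega
      rw [h2, List.nil_append, ih]

theorem flatten_take (k : Nat) (p : List Nat) :
    ((p.map (natBits 8)).flatten).take (8 * k) = (((p.take k).map (natBits 8)).flatten) := by
  induction k generalizing p with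
  | zero => simp
  | succ k ih =>
    cases p with
    | nil => simp
    | cons x xs =>
      simp only [List.map_cons, List.flatten_cons, List.take_succ_cons]
      rw [List.take_append, natBits_length]
      rw [List.take_of_length_le (by rw [natBits_length]; omega)]
      have h2 : 8 * (k + 1) - 8 = 8 * k := by omega
      rw [h2, ih]

theorem chunks_eq (p : List Nat) (hp : ∀ x ∈ p, x < 256) (hd : 4 ∣ p.length) :
    (PySem.List.pyRange 0 ((((p.map (natBits 8)).flatten).length : Int)) 32).map
      (fun i => pvBinVal (PySem.List.slice ((p.map (natBits 8)).flatten) (some i) (some (i + 32))))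
    = (PySem.List.pyRange 0 ((p.length : Int)) 4).map
      (fun i => pvFromBytesBE (PySem.List.slice p (some i) (some (i + 4)))) := by
  obtain ⟨m, hm⟩ := hd
  rw [flatten_length, hm]
  rw [PySem.List.pyRange_of_pos 0 ((8 * (4 * m) : Nat) : Int) (by norm_num : (0:Int) < 32)]
  rw [PySem.List.pyRange_of_pos 0 ((4 * m : Nat) : Int) (by norm_num : (0:Int) < 4)]
  have hc1 : (if (0:Int) < ((8 * (4 * m) : Nat) : Int)
      then ((((8 * (4 * m) : Nat) : Int) - 0 + 32 - 1) / 32).toNat else 0) = m := by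
    split <;> omega
  have hc2 : (if (0:Int) < ((4 * m : Nat) : Int)
      then ((((4 * m : Nat) : Int) - 0 + 4 - 1) / 4).toNat else 0) = m := by
    split <;> omega
  rw [hc1, hc2, List.map_map, List.map_map]
  apply List.map_congr_left
  intro k hk
  simp only [Function.comp_apply]
  have e1 : (0 + 32 * (k : Int)) = ((32 * k : Nat) : Int) := by push_cast; ring
  have e2 : (0 + 32 * (k : Int) + 32) = (((32 * k : Nat) : Int) + ((32 : Nat) : Int)) := by
    push_cast; ring
  have e3 : (0 + 4 * (k : Int)) = ((4 * k : Nat) : Int) := by push_cast; ring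
  have e4 : (0 + 4 * (k : Int) + 4) = (((4 * k : Nat) : Int) + ((4 : Nat) : Int)) := by
    push_cast; ring
  rw [e2, e1, e4, e3, PySem.List.slice_natCast_add, PySem.List.slice_natCast_add]
  have e5 : 32 * k = 8 * (4 * k) := by ring
  rw [e5, flatten_drop, show (32 : Nat) = 8 * 4 by norm_num, flatten_take]
  have hy : ∀ y ∈ (p.drop (4 * k)).take 4, y < 256 :=
    fun y hyy => hp y (List.mem_of_mem_drop (List.mem_of_mem_take hyy))
  have hv := binVal_flatten ((p.drop (4 * k)).take 4) hy 0
  unfold pvBinVal pvFromBytesBE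
  rw [Nat.cast_zero] at hv
  exact hv

theorem pvToBytesBE_length (k n : Nat) : (pvToBytesBE k n).length = k := by
  induction k generalizing n with
  | zero => rfl
  | succ k ih => rw [pvToBytesBE]; simp [ih]

theorem flatten_replicate_zero (k : Nat) :
    ((List.replicate k 0).map (natBits 8)).flatten = List.replicate (8 * k) '0' := by
  induction k with
  | zero => rfl
  | succ k ih =>
    rw [List.replicate_succ]
    simp only [List.map_cons, List.flatten_cons]
    rw [ih, natBits_zero]
    rw [show 8 * (k + 1) = 8 + 8 * k by ring, List.replicate_add]

theorem natBits_128 : natBits 8 128 = '1' :: List.replicate 7 '0' := by decide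

-- ===== VERDICT (by name: the statement is the Claim_ definition above) =====
theorem sha_preprocess_spec : Claim_equal_sha_preprocess := by
  intro message hDom hPre
  unfold Spec_sha_preprocess sha_preprocess sha_preprocess_alt
  dsimp only
  set cs := message.toList with hcs
  set n := cs.length with hn
  set bs := cs.map Char.toNat with hbs
  have hbsl : bs.length = n := by rw [hbs, List.length_map, hn]
  have h256 : ∀ c ∈ cs, c.toNat < 256 := by
    intro c hc
    unfold Dom_sha_preprocess pvDomStr at hDom
    rw [← hcs, List.all_eq_true] at hDom
    have h := hDom c hc
    unfold pvDomChar at h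
    simp only [Bool.or_eq_true, Bool.and_eq_true, decide_eq_true_eq, beq_iff_eq] at h
    omega
  have hmap : cs.map (fun c => pvPad0 8 (PySem.Int.toBinChars (c.toNat : Int))) = bs.map (natBits 8) := by
    rw [hbs, List.map_map]
    apply List.map_congr_left
    intro c hc
    simp only [Function.comp_apply]
    rw [toBinChars_natCast, pad0_rawBin 8 _ (by norm_num)
      (by rw [show (2:Nat) ^ 8 = 256 from by norm_num]; exact h256 c hc)]
  have hlen : PySem.Str.len message * 8 = ((n * 8 : Nat) : Int) := by
    rw [PySem.Str.len_eq, ← hcs, ← hn]; push_cast; ring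
  have hbound : n * 8 < 2 ^ 64 := by
    unfold Pre_sha_preprocess at hPre
    rw [← hcs, ← hn] at hPre
    rw [show (2:Nat) ^ 64 = 18446744073709551616 from by norm_num]
    omega
  have hlb : pvPad0 64 (PySem.Int.toBinChars (((n * 8 : Nat)) : Int))
      = ((pvToBytesBE 8 (n * 8)).map (natBits 8)).flatten := by
    rw [toBinChars_natCast, pad0_rawBin 64 _ (by norm_num) hbound, bytes_flatten]
  set kA := (512 - ((8 * n + 1) + 64) % 512) % 512 with hkA
  set kB := (64 - ((n + 1) + 8) % 64) % 64 with hkB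
  have hAlen : ((bs.map (natBits 8)).flatten ++ ['1']).length = 8 * n + 1 := by
    rw [List.length_append, flatten_length, hbsl]; rfl
  have hA := shaPadA_eq 512 ((bs.map (natBits 8)).flatten ++ ['1']) (by rw [hAlen]; omega)
  rw [hAlen] at hA
  have hBlen : (bs ++ [128]).length = n + 1 := by simp [hbsl]
  have hBpad := altPadB_eq 64 (bs ++ [128]) (by rw [hBlen]; omega)
  rw [hBlen] at hBpad
  have hkey : (((bs ++ [128] ++ List.replicate kB 0) ++ pvToBytesBE 8 (n * 8)).map (natBits 8)).flatten
      = ((bs.map (natBits 8)).flatten ++ ['1'] ++ List.replicate kA '0')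
        ++ ((pvToBytesBE 8 (n * 8)).map (natBits 8)).flatten := by
    simp only [List.map_append, List.flatten_append]
    congr 1
    simp only [List.map_cons, List.map_nil, List.flatten_cons, List.flatten_nil,
      List.append_nil]
    rw [natBits_128, flatten_replicate_zero]
    rw [List.append_assoc]
    conv_rhs => rw [List.append_assoc]
    congr 1
    have hk : kA = 7 + 8 * kB := by rw [hkA, hkB]; omega
    rw [hk, List.replicate_add]
    rfl
  rw [hmap, hlen, hlb, hA, hBpad, ← hkey]
  have hp256 : ∀ x ∈ (bs ++ [128] ++ List.replicate kB 0) ++ pvToBytesBE 8 (n * 8), x < 256 := by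
    intro x hx
    rcases List.mem_append.mp hx with hx | hx
    · rcases List.mem_append.mp hx with hx | hx
      · rcases List.mem_append.mp hx with hx | hx
        · obtain ⟨c, hc, rfl⟩ := List.mem_map.mp (hbs ▸ hx)
          exact h256 c hc
        · simp at hx; omega
      · have := List.eq_of_mem_replicate hx; omega
    · exact pvToBytesBE_lt 8 (n * 8) x hx
  have hdvd : 4 ∣ ((bs ++ [128] ++ List.replicate kB 0) ++ pvToBytesBE 8 (n * 8)).length := by
    simp only [List.length_append, List.length_cons, List.length_nil, List.length_replicate,
      pvToBytesBE_length, hbsl]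
    omega
  exact chunks_eq _ hp256 hdvd
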